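-- pv_equiv track=rewrite | github.com/MrHDR/JoeyJoebags | Source/GBcam310.py | Two2One
-- ===== SOURCE A (Python) =====
-- def Two2One(Byte1,Byte2):
--     base3=[0,0,0,0,0,0,0,0]
--     shnu=7
--     for bits in range (0,8):
--         bi1=(Byte1 >> bits)& 1
--         bi2=(Byte2 >> bits)& 1
--         base3[shnu]=(1*bi1)+(2*bi2)
--         shnu-=1
--     return base3
-- ===== SOURCE B (Python) =====
-- def Two2One(Byte1, Byte2):
--     s1 = format(Byte1 & 0xFF, '08b')
--     s2 = format(Byte2 & 0xFF, '08b')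
--     return [int(s1[i]) + 2 * int(s2[i]) for i in range(8)]
-- ===== Notes on version B (the rewrite author's own statement) =====
-- stated objective: idiomatic
-- what changed: B masks each byte to 0..255, formats both as 8-character MSB-first binary strings, and builds the result as a single comprehension int(s1[i]) + 2*int(s2[i]), replacing A's shift-and-mask loop with a mutated list and a decrementing write index.
import Mathlib
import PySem

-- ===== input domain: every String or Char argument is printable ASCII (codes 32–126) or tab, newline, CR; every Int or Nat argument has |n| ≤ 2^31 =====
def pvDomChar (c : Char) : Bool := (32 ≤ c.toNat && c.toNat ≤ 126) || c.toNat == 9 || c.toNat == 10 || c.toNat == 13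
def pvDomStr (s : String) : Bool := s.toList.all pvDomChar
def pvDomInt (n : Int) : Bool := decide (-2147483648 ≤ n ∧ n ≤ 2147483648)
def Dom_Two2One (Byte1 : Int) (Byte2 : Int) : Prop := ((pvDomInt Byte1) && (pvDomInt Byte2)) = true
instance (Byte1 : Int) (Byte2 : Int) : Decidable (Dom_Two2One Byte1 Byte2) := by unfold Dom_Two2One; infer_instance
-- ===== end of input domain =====

-- B replaces A's in-place shift-and-mask loop with two masked 8-digit binary expansions
-- (format(b & 0xFF, '08b')) read off position by position (idiomatic; same cost).


-- ===== PORT A =====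
-- literal port: base3 = [0]*8; shnu = 7; for bits in range(0,8): base3[shnu] = 1*bi1 + 2*bi2; shnu -= 1.
-- Python's '>>' is Lean's '>>>' with a Nat shift amount; 'bits' ranges over 0..7 so '.toNat' is exact.
def Two2One (Byte1 : Int) (Byte2 : Int) : List Int :=
  let base3 : List Int := [0, 0, 0, 0, 0, 0, 0, 0]
  let shnu : Int := 7
  let r := (PySem.List.pyRange 0 8 1).foldl
    (fun (st : List Int × Int) (bits : Int) =>
      let bi1 := PySem.Int.band (Byte1 >>> bits.toNat) 1
      let bi2 := PySem.Int.band (Byte2 >>> bits.toNat) 1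
      (PySem.List.pySetD st.1 st.2 (1 * bi1 + 2 * bi2), st.2 - 1))
    (base3, shnu)
  r.1

-- ===== PORT B =====
-- pvBin8 m = the digits of format(m, '08b') read as ints (the int(s[i]) of Source B);
-- exact for 0 ≤ m < 256, which 'Byte & 0xFF' (= PySem.Int.band · 255) guarantees.
def pvBin8 (m : Nat) : List Int :=
  (List.range 8).map (fun i => ((m / 2 ^ (7 - i)) % 2 : Nat))

def Two2One_alt (Byte1 : Int) (Byte2 : Int) : List Int :=
  let s1 := pvBin8 (PySem.Int.band Byte1 255).toNat
  let s2 := pvBin8 (PySem.Int.band Byte2 255).toNat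
  (List.range 8).map (fun i => s1.getD i 0 + 2 * s2.getD i 0)

-- ===== PRECONDITION & SPEC =====
def Spec_Two2One (Byte1 : Int) (Byte2 : Int) (out : List Int) : Prop := out = Two2One_alt Byte1 Byte2
instance (Byte1 : Int) (Byte2 : Int) (out : List Int) : Decidable (Spec_Two2One Byte1 Byte2 out) := by unfold Spec_Two2One; infer_instance

-- ===== CLAIM (what is proved, stated in full; the proofs are below) =====
def Claim_equal_Two2One : Prop := ∀ (Byte1 : Int) (Byte2 : Int), Dom_Two2One Byte1 Byte2 → Spec_Two2One Byte1 Byte2 (Two2One Byte1 Byte2)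

-- ===== LEMMAS AND PROOFS =====

-- Python's 'x & 0xFF' is x mod 256.
theorem pv_band255 (x : Int) : PySem.Int.band x 255 = x % 256 := by
  unfold PySem.Int.band
  split_ifs with h h2 h3
  · have : x.toNat &&& (255:Int).toNat = x.toNat % 256 := by
      have := Nat.and_two_pow_sub_one_eq_mod x.toNat 8
      simpa using this
    omega
  · omega
  · have : (255:Int).toNat &&& (-x - 1).toNat = (-x - 1).toNat % 256 := by
      have := Nat.and_two_pow_sub_one_eq_mod (-x - 1).toNat 8
      simpa [Nat.and_comm] using this
    omega
  · omega

-- bit k of x (A's shift-and-mask) equals binary digit 7-k of the masked byte (B's string digit).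
theorem pv_bit_eq (x : Int) (k : Nat) (hk : k < 8) :
    PySem.Int.band (x >>> k) 1 = (((PySem.Int.band x 255).toNat / 2 ^ k) % 2 : Nat) := by
  rw [PySem.Int.band_one, PySem.Int.mod_eq_emod_of_pos (by norm_num), pv_band255,
      Int.shiftRight_eq_div_pow]
  have hm : (0:Int) ≤ x % 256 := Int.emod_nonneg x (by norm_num)
  rw [show ((((x % 256).toNat / 2 ^ k) % 2 : Nat) : Int)
        = ((x % 256) / 2 ^ k) % 2 by push_cast [Int.toNat_of_nonneg hm]; rfl]
  interval_cases k <;> norm_num <;> omega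

-- the same equality in the cast-normalised form norm_num produces
theorem pv_bit_eq' (x : Int) (k : Nat) (hk : k < 8) :
    PySem.Int.band (x >>> k) 1 = max (PySem.Int.band x 255) 0 / 2 ^ k % 2 := by
  rw [pv_bit_eq x k hk]
  push_cast [Int.toNat_eq_max]
  ring_nf

theorem pv_bit_eq0 (x : Int) :
    PySem.Int.band x 1 = max (PySem.Int.band x 255) 0 % 2 := by
  have := pv_bit_eq' x 0 (by norm_num)
  simpa using this

theorem pv_main (x y : Int) : Two2One x y = Two2One_alt x y := by
  have h0 : PySem.List.pyRange 0 8 1 = [0, 1, 2, 3, 4, 5, 6, 7] := by decide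
  have hr : List.range 8 = [0, 1, 2, 3, 4, 5, 6, 7] := by decide
  simp only [Two2One, Two2One_alt, pvBin8, h0, hr, List.foldl, List.map, List.getD]
  norm_num [PySem.List.pySetD_of_nonneg]
  norm_num [List.set, Int.toNat, pv_bit_eq0 x, pv_bit_eq0 y, pv_bit_eq' x 1 (by norm_num), pv_bit_eq' y 1 (by norm_num), pv_bit_eq' x 2 (by norm_num), pv_bit_eq' y 2 (by norm_num), pv_bit_eq' x 3 (by norm_num), pv_bit_eq' y 3 (by norm_num), pv_bit_eq' x 4 (by norm_num), pv_bit_eq' y 4 (by norm_num), pv_bit_eq' x 5 (by norm_num), pv_bit_eq' y 5 (by norm_num), pv_bit_eq' x 6 (by norm_num), pv_bit_eq' y 6 (by norm_num), pv_bit_eq' x 7 (by norm_num), pv_bit_eq' y 7 (by norm_num)]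

-- ===== VERDICT (by name: the statement is the Claim_ definition above) =====
theorem Two2One_spec : Claim_equal_Two2One := by
  intro x y _
  unfold Spec_Two2One
  exact pv_main x y
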